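-- pv_equiv track=rewrite | github.com/petergpt/print-dock | skills/surprise-print/scripts/fetch_news_digest.py | compose_motifs
-- ===== SOURCE A (Python) =====
-- THEME_MOTIFS: dict[str, list[str]] = {
--     "science": ["orbits", "observatories", "balloons", "lab glass", "starlight"],
--     "technology": ["circuits", "robots", "holograms", "launchpads", "neon interfaces"],
--     "culture-sports": ["stadium lights", "confetti", "music waves", "spotlights", "crowds"],
--     "economy": ["city skylines", "market boards", "cargo routes", "bridges", "sunrise offices"],
--     "geopolitics": ["globes", "maps", "meeting tables", "diplomatic halls", "city landmarks"],
--     "climate": ["wind turbines", "oceans", "green canopies", "sunbeams", "rainclouds"],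
--     "health": ["care teams", "wellness icons", "clinical labs", "healing hands", "clean interiors"],
-- }
--
-- def compose_motifs(themes: list[str], extracted: list[str], limit: int = 7) -> list[str]:
--     motifs: list[str] = []
--
--     for term in extracted:
--         cleaned = term.replace("-", " ").strip()
--         if cleaned and cleaned not in motifs:
--             motifs.append(cleaned)
--         if len(motifs) >= limit:
--             return motifs
--
--     for theme in themes:
--         for motif in THEME_MOTIFS.get(theme, []):
--             if motif in motifs:
--                 continue
--             motifs.append(motif)
--             if len(motifs) >= limit:
--                 return motifs
--
--     return motifs[:limit]
-- ===== SOURCE B (Python) =====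
-- # Flat (theme, motif) rows instead of a dict of lists; staged pipeline instead of
-- # A's fused stateful loop: build the full ordered candidate list, then keep each
-- # candidate whose first occurrence is at its own index, then cap with a slice.
-- THEME_MOTIF_ROWS: list[tuple[str, str]] = [
--     ("science", "orbits"), ("science", "observatories"), ("science", "balloons"),
--     ("science", "lab glass"), ("science", "starlight"),
--     ("technology", "circuits"), ("technology", "robots"), ("technology", "holograms"),
--     ("technology", "launchpads"), ("technology", "neon interfaces"),
--     ("culture-sports", "stadium lights"), ("culture-sports", "confetti"),
--     ("culture-sports", "music waves"), ("culture-sports", "spotlights"),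
--     ("culture-sports", "crowds"),
--     ("economy", "city skylines"), ("economy", "market boards"), ("economy", "cargo routes"),
--     ("economy", "bridges"), ("economy", "sunrise offices"),
--     ("geopolitics", "globes"), ("geopolitics", "maps"), ("geopolitics", "meeting tables"),
--     ("geopolitics", "diplomatic halls"), ("geopolitics", "city landmarks"),
--     ("climate", "wind turbines"), ("climate", "oceans"), ("climate", "green canopies"),
--     ("climate", "sunbeams"), ("climate", "rainclouds"),
--     ("health", "care teams"), ("health", "wellness icons"), ("health", "clinical labs"),
--     ("health", "healing hands"), ("health", "clean interiors"),
-- ]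
--
--
-- def compose_motifs(themes: list[str], extracted: list[str], limit: int = 7) -> list[str]:
--     candidates = [c for c in (t.replace("-", " ").strip() for t in extracted) if c]
--     for th in themes:
--         candidates.extend(m for t, m in THEME_MOTIF_ROWS if t == th)
--     uniq = [c for i, c in enumerate(candidates) if c not in candidates[:i]]
--     return uniq[:limit]
-- ===== Notes on version B (the rewrite author's own statement) =====
-- stated objective: alternative
-- what changed: A's single fused stateful loop (membership scan against the growing result, three early-return exits, a dict of motif lists) becomes a staged pipeline over a flat (theme, motif) row table: build the full ordered candidate list, keep each candidate whose first occurrence is at its own index, cap with a slice.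
-- outside the precondition, e.g. on compose_motifs(['science'], [], 0): A returns ['orbits'], B returns []; on compose_motifs([], ['a', 'b'], 0): A returns ['a'], B returns []
import Mathlib
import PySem

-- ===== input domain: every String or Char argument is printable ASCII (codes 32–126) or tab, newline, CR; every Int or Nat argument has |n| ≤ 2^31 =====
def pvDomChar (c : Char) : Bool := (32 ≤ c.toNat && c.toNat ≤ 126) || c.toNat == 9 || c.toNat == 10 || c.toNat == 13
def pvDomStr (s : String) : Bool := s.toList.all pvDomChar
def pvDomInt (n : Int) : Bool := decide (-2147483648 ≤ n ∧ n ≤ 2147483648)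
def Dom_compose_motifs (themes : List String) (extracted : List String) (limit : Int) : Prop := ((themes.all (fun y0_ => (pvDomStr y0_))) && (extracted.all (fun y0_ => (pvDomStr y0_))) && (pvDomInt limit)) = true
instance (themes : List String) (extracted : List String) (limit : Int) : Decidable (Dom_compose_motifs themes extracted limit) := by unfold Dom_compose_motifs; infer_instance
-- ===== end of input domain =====

-- B replaces A's fused stateful loop (membership scan against the growing result, three early
-- returns, a dict of lists) by a staged pipeline over a flat (theme, motif) row table:
-- build the full ordered candidate list, keep first occurrences by index, cap with a slice
-- (objective: alternative).

-- ===== PORT A =====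
-- the module constant THEME_MOTIFS (a dict, as an association list in insertion order)
def pvThemeMotifs : PySem.Dict String (List String) :=
  PySem.Dict.mk [("science", ["orbits", "observatories", "balloons", "lab glass", "starlight"]),
   ("technology", ["circuits", "robots", "holograms", "launchpads", "neon interfaces"]),
   ("culture-sports", ["stadium lights", "confetti", "music waves", "spotlights", "crowds"]),
   ("economy", ["city skylines", "market boards", "cargo routes", "bridges", "sunrise offices"]),
   ("geopolitics", ["globes", "maps", "meeting tables", "diplomatic halls", "city landmarks"]),
   ("climate", ["wind turbines", "oceans", "green canopies", "sunbeams", "rainclouds"]),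
   ("health", ["care teams", "wellness icons", "clinical labs", "healing hands", "clean interiors"])]

-- term.replace("-", " ").strip()
def pvClean (term : String) : String := PySem.Str.strip (PySem.Str.replace term "-" " ")

-- A's first loop: for term in extracted (Sum.inl = the early 'return motifs')
def pvALoop1 (limit : Int) : List String → List String → Sum (List String) (List String)
  | [], motifs => .inr motifs
  | term :: rest, motifs =>
    let cleaned := pvClean term
    let motifs := if cleaned != "" && !(motifs.contains cleaned) then motifs ++ [cleaned] else motifs
    if limit ≤ (motifs.length : Int) then .inl motifs else pvALoop1 limit rest motifs

-- A's inner loop: for motif in THEME_MOTIFS.get(theme, [])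
def pvALoop2Inner (limit : Int) : List String → List String → Sum (List String) (List String)
  | [], motifs => .inr motifs
  | motif :: ms, motifs =>
    if motifs.contains motif then pvALoop2Inner limit ms motifs
    else
      let motifs := motifs ++ [motif]
      if limit ≤ (motifs.length : Int) then .inl motifs else pvALoop2Inner limit ms motifs

-- A's outer loop: for theme in themes
def pvALoop2 (limit : Int) : List String → List String → Sum (List String) (List String)
  | [], motifs => .inr motifs
  | theme :: rest, motifs =>
    match pvALoop2Inner limit (PySem.Dict.getD pvThemeMotifs theme []) motifs with
    | .inl m => .inl m
    | .inr m => pvALoop2 limit rest m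

def compose_motifs (themes : List String) (extracted : List String) (limit : Int) : List String :=
  match pvALoop1 limit extracted [] with
  | .inl m => m
  | .inr m =>
    match pvALoop2 limit themes m with
    | .inl m' => m'
    | .inr m' => PySem.List.slice m' none (some limit)   -- motifs[:limit]

-- ===== PORT B =====
-- Source B's THEME_MOTIF_ROWS: the same table as flat (theme, motif) rows
def pvThemeMotifRows : List (String × String) :=
  [("science", "orbits"), ("science", "observatories"), ("science", "balloons"),
   ("science", "lab glass"), ("science", "starlight"),
   ("technology", "circuits"), ("technology", "robots"), ("technology", "holograms"),
   ("technology", "launchpads"), ("technology", "neon interfaces"),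
   ("culture-sports", "stadium lights"), ("culture-sports", "confetti"),
   ("culture-sports", "music waves"), ("culture-sports", "spotlights"),
   ("culture-sports", "crowds"),
   ("economy", "city skylines"), ("economy", "market boards"), ("economy", "cargo routes"),
   ("economy", "bridges"), ("economy", "sunrise offices"),
   ("geopolitics", "globes"), ("geopolitics", "maps"), ("geopolitics", "meeting tables"),
   ("geopolitics", "diplomatic halls"), ("geopolitics", "city landmarks"),
   ("climate", "wind turbines"), ("climate", "oceans"), ("climate", "green canopies"),
   ("climate", "sunbeams"), ("climate", "rainclouds"),
   ("health", "care teams"), ("health", "wellness icons"), ("health", "clinical labs"),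
   ("health", "healing hands"), ("health", "clean interiors")]

def compose_motifs_alt (themes : List String) (extracted : List String) (limit : Int) : List String :=
  -- candidates = cleaned non-empty extracted terms …
  let cands0 := (extracted.map (fun t => PySem.Str.strip (PySem.Str.replace t "-" " "))).filter (fun c => c != "")
  -- … extended, per theme, with the matching rows of the flat table
  let cands := themes.foldl (fun cs th => cs ++ (pvThemeMotifRows.filter (fun r => r.1 == th)).map (fun r => r.2)) cands0
  -- uniq = [c for i, c in enumerate(candidates) if c not in candidates[:i]]
  let uniq := ((PySem.List.enumerate cands).filter (fun p => !((PySem.List.slice cands none (some p.1)).contains p.2))).map (fun p => p.2)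
  PySem.List.slice uniq none (some limit)   -- uniq[:limit]

-- ===== PRECONDITION & SPEC =====
-- Pre_ excludes non-positive limits — outside the cap's natural domain (default 7) — where A's
-- post-append early return can yield a list longer than the cap (e.g. one motif for limit = 0).
def Pre_compose_motifs (themes : List String) (extracted : List String) (limit : Int) : Prop := 1 ≤ limit
instance (themes : List String) (extracted : List String) (limit : Int) : Decidable (Pre_compose_motifs themes extracted limit) := by unfold Pre_compose_motifs; infer_instance
def pvWitness_compose_motifs : List String × List String × Int := (["science"], ["ai-art", "  ", "robots"], 3)

def Spec_compose_motifs (themes : List String) (extracted : List String) (limit : Int) (out : List String) : Prop := out = compose_motifs_alt themes extracted limit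
instance (themes : List String) (extracted : List String) (limit : Int) (out : List String) : Decidable (Spec_compose_motifs themes extracted limit out) := by unfold Spec_compose_motifs; infer_instance

-- ===== CLAIM (what is proved, stated in full; the proofs are below) =====
def Claim_equal_compose_motifs : Prop := ∀ (themes : List String) (extracted : List String) (limit : Int), Dom_compose_motifs themes extracted limit → Pre_compose_motifs themes extracted limit → Spec_compose_motifs themes extracted limit (compose_motifs themes extracted limit)

-- ===== LEMMAS AND PROOFS =====

-- the common "append if new, stop at the cap" loop both of A's phases reduce to under the invariant
def pvRun (limit : Int) : List String → List String → Sum (List String) (List String)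
  | [], acc => .inr acc
  | c :: cs, acc =>
    let a' := PySem.Set.add acc c
    if limit ≤ (a'.length : Int) then .inl a' else pvRun limit cs a'

def pvFin (limit : Int) : Sum (List String) (List String) → List String
  | .inl m => m
  | .inr m => m.take limit.toNat

theorem pvSet_add_len (acc : List String) (c : String) :
    acc.length ≤ (PySem.Set.add acc c).length ∧ (PySem.Set.add acc c).length ≤ acc.length + 1 := by
  simp only [PySem.Set.add]
  split <;> simp

theorem pvPrefix_foldl (cs : List String) (acc : List String) :
    acc <+: List.foldl PySem.Set.add acc cs := by
  induction cs generalizing acc with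
  | nil => simp
  | cons c cs ih =>
    refine List.IsPrefix.trans ?_ (ih (PySem.Set.add acc c))
    simp only [PySem.Set.add]
    split <;> simp

theorem pvRun_take (limit : Int) (cs : List String) (acc : List String)
    (h : (acc.length : Int) < limit) :
    pvFin limit (pvRun limit cs acc) = (List.foldl PySem.Set.add acc cs).take limit.toNat := by
  induction cs generalizing acc with
  | nil =>
    simp [pvRun, pvFin]
  | cons c cs ih =>
    have hlen := pvSet_add_len acc c
    simp only [pvRun, List.foldl]
    split
    · next hstop =>
      have hl : (PySem.Set.add acc c).length = limit.toNat := by omega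
      obtain ⟨t, ht⟩ := pvPrefix_foldl cs (PySem.Set.add acc c)
      simp only [pvFin, ← ht, ← hl, List.take_left]
    · next hstop => exact ih _ (by omega)

theorem pvRun_append (limit : Int) (xs ys : List String) (acc : List String) :
    pvRun limit (xs ++ ys) acc =
      match pvRun limit xs acc with
      | .inl m => .inl m
      | .inr m => pvRun limit ys m := by
  induction xs generalizing acc with
  | nil => simp [pvRun]
  | cons x xs ih =>
    simp only [List.cons_append, pvRun]
    split
    · rfl
    · exact ih _

theorem pvRun_inr_lt (limit : Int) (cs : List String) (acc m : List String)
    (h : pvRun limit cs acc = .inr m) (hacc : (acc.length : Int) < limit) :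
    (m.length : Int) < limit := by
  induction cs generalizing acc with
  | nil => simp only [pvRun] at h; cases h; exact hacc
  | cons c cs ih =>
    simp only [pvRun] at h
    split at h
    · cases h
    · next hstop => exact ih _ h (by omega)

theorem pvALoop1_eq_run (limit : Int) (terms : List String) (acc : List String)
    (h : (acc.length : Int) < limit) :
    pvALoop1 limit terms acc = pvRun limit ((terms.map pvClean).filter (fun c => c != "")) acc := by
  induction terms generalizing acc with
  | nil => simp [pvALoop1, pvRun]
  | cons t ts ih =>
    simp only [pvALoop1, List.map_cons, List.filter_cons]
    by_cases he : pvClean t = ""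
    · have h1 : (pvClean t != "") = false := by simp [he]
      simp only [h1, Bool.false_and, Bool.false_eq_true, if_false]
      rw [if_neg (by omega)]
      exact ih _ h
    · have h1 : (pvClean t != "") = true := by simp [he]
      by_cases hc : pvClean t ∈ acc
      · have hcl : acc.contains (pvClean t) = true := by simpa using hc
        have hadd : PySem.Set.add acc (pvClean t) = acc := by simp [PySem.Set.add, hc]
        simp only [h1, Bool.true_and, hcl, Bool.not_true, Bool.false_eq_true, if_false,
          if_true, pvRun, hadd]
        split
        · rfl
        · exact ih _ h
      · have hcl : acc.contains (pvClean t) = false := by simpa using hc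
        have hadd : PySem.Set.add acc (pvClean t) = acc ++ [pvClean t] := by
          simp [PySem.Set.add, hc]
        simp only [h1, Bool.true_and, hcl, Bool.not_false, if_true, pvRun, hadd]
        split
        · rfl
        · next hstop =>
          have := pvSet_add_len acc (pvClean t)
          rw [hadd] at this
          exact ih _ (by omega)

theorem pvALoop2Inner_eq_run (limit : Int) (ms : List String) (acc : List String)
    (h : (acc.length : Int) < limit) :
    pvALoop2Inner limit ms acc = pvRun limit ms acc := by
  induction ms generalizing acc with
  | nil => simp [pvALoop2Inner, pvRun]
  | cons m ms ih =>
    by_cases hm : m ∈ acc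
    · have hc : acc.contains m = true := by simpa using hm
      have hadd : PySem.Set.add acc m = acc := by simp [PySem.Set.add, hm]
      simp only [pvALoop2Inner, pvRun, hc, if_true, hadd]
      rw [if_neg (by omega)]
      exact ih _ h
    · have hc : acc.contains m = false := by simpa using hm
      have hadd : PySem.Set.add acc m = acc ++ [m] := by simp [PySem.Set.add, hm]
      simp only [pvALoop2Inner, pvRun, hc, Bool.false_eq_true, if_false, hadd]
      split
      · rfl
      · next hstop =>
        have := pvSet_add_len acc m
        rw [hadd] at this
        exact ih _ (by omega)

theorem pvALoop2_eq_run (limit : Int) (ths : List String) (acc : List String)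
    (h : (acc.length : Int) < limit) :
    pvALoop2 limit ths acc
      = pvRun limit (ths.flatMap (fun theme => PySem.Dict.getD pvThemeMotifs theme [])) acc := by
  induction ths generalizing acc with
  | nil => simp [pvALoop2, pvRun]
  | cons th ths ih =>
    simp only [pvALoop2, List.flatMap_cons]
    rw [pvRun_append, pvALoop2Inner_eq_run limit _ _ h]
    cases hr : pvRun limit (PySem.Dict.getD pvThemeMotifs th []) acc with
    | inl m => rfl
    | inr m => exact ih _ (pvRun_inr_lt limit _ _ _ hr h)

-- B's per-theme row scan yields exactly A's dict lookup
theorem pvRows_eq_getD (th : String) :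
    (pvThemeMotifRows.filter (fun r => r.1 == th)).map (fun r => r.2)
      = PySem.Dict.getD pvThemeMotifs th [] := by
  by_cases h1 : th = "science"; · subst h1; decide
  by_cases h2 : th = "technology"; · subst h2; decide
  by_cases h3 : th = "culture-sports"; · subst h3; decide
  by_cases h4 : th = "economy"; · subst h4; decide
  by_cases h5 : th = "geopolitics"; · subst h5; decide
  by_cases h6 : th = "climate"; · subst h6; decide
  by_cases h7 : th = "health"; · subst h7; decide
  simp [pvThemeMotifRows, pvThemeMotifs, PySem.Dict.getD, PySem.Dict.get?,
    Ne.symm h1, Ne.symm h2, Ne.symm h3, Ne.symm h4, Ne.symm h5, Ne.symm h6, Ne.symm h7]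

-- B's first-occurrence index filter is ordered dedup (set-of-list)
theorem pvUniq_eq_ofList (xs : List String) :
    ((PySem.List.enumerate xs).filter (fun p => !((PySem.List.slice xs none (some p.1)).contains p.2))).map (fun p => p.2)
      = PySem.Set.ofList xs := by
  induction xs using List.reverseRecOn with
  | nil => decide
  | append_singleton xs x ih =>
    rw [PySem.List.enumerate_append, List.filter_append, List.map_append,
      PySem.Set.ofList_append_singleton]
    have hmemfix : ∀ p ∈ PySem.List.enumerate xs 0,
        (fun p => !((PySem.List.slice (xs ++ [x]) none (some p.1)).contains p.2)) p
          = (fun p => !((PySem.List.slice xs none (some p.1)).contains p.2)) p := by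
      intro p hp
      rcases (PySem.List.mem_enumerate_iff _ _ _).1 hp with ⟨k, hk, rfl⟩
      simp only [zero_add, PySem.List.slice_to_natCast]
      rw [List.take_append_of_le_length (by omega)]
    rw [List.filter_congr hmemfix, ih]
    have hx : PySem.List.slice (xs ++ [x]) none (some ((0 : Int) + xs.length)) = xs := by
      simp only [zero_add, PySem.List.slice_to_natCast]
      exact List.take_left ..
    by_cases hmem : x ∈ xs
    · simp [PySem.List.enumerate, hmem, PySem.Set.add, PySem.Set.mem_ofList]
    · simp [PySem.List.enumerate, hmem, PySem.Set.add, PySem.Set.mem_ofList]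

-- ===== VERDICT (by name: the statement is the Claim_ definition above) =====
theorem compose_motifs_spec : Claim_equal_compose_motifs := by
  intro themes extracted limit _hDom hPre
  have hPre' : (1 : Int) ≤ limit := hPre
  simp only [Spec_compose_motifs, compose_motifs, compose_motifs_alt]
  set cs1 : List String := (extracted.map pvClean).filter (fun c => c != "") with hcs1
  set cs2 : List String := themes.flatMap (fun theme => PySem.Dict.getD pvThemeMotifs theme []) with hcs2
  have hB0 : (extracted.map (fun t => PySem.Str.strip (PySem.Str.replace t "-" " "))).filter (fun c => c != "") = cs1 := rfl
  have hB : themes.foldl (fun cs th => cs ++ (pvThemeMotifRows.filter (fun r => r.1 == th)).map (fun r => r.2)) cs1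
      = cs1 ++ cs2 := by
    rw [PySem.List.foldl_append_eq_flatMap]
    simp only [hcs2, funext pvRows_eq_getD]
  rw [hB0, hB, pvUniq_eq_ofList, PySem.Set.ofList_eq_foldl]
  have hslice : ∀ xs : List String, PySem.List.slice xs none (some limit) = xs.take limit.toNat :=
    fun xs => PySem.List.slice_to xs (by omega)
  rw [hslice]
  have hA0 : ((List.nil (α := String)).length : Int) < limit := by simp; omega
  rw [pvALoop1_eq_run limit extracted [] hA0]
  have key : pvFin limit (pvRun limit (cs1 ++ cs2) [])
      = (List.foldl PySem.Set.add [] (cs1 ++ cs2)).take limit.toNat :=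
    pvRun_take limit _ _ hA0
  rw [← key, pvRun_append]
  cases h1 : pvRun limit cs1 [] with
  | inl m => rfl
  | inr m =>
    have hm := pvRun_inr_lt limit _ _ _ h1 hA0
    show (match pvALoop2 limit themes m with
          | Sum.inl m' => m'
          | Sum.inr m' => PySem.List.slice m' none (some limit)) = pvFin limit (pvRun limit cs2 m)
    rw [pvALoop2_eq_run limit themes m hm]
    cases h2 : pvRun limit cs2 m with
    | inl m' => rfl
    | inr m' => exact hslice m'
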